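-- pv_equiv track=rewrite | github.com/CrowdingFaun624/JavaDataMiner | DataMiners/SoundEvents/SoundEvents4.py | filter_strange_underscores
-- ===== SOURCE A (Python) =====
-- def filter_strange_underscores(string_list:list[str]) -> list[str]:
--     output:list[str] = []
--     for item in string_list:
--         split_items = item.split(".")
--         is_bad = False
--         for split_item in split_items:
--             if split_item.endswith("_") or split_item.startswith("_"): is_bad = True; break
--         if not is_bad: output.append(item)
--     return output
-- ===== SOURCE B (Python) =====
-- def _bad(item: str) -> bool:
--     return item.startswith("_") or item.endswith("_") or "._" in item or "_." in item
--
-- def filter_strange_underscores(string_list: list[str]) -> list[str]: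
--     return [item for item in string_list if not _bad(item)]
-- ===== Notes on version B (the rewrite author's own statement) =====
-- stated objective: idiomatic
-- what changed: Replaced the split('.')-plus-inner-scan with a direct test of four boundary conditions (leading '_', trailing '_', substring '._', substring '_.') in a list comprehension, so no segment list is ever built.
import Mathlib
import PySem

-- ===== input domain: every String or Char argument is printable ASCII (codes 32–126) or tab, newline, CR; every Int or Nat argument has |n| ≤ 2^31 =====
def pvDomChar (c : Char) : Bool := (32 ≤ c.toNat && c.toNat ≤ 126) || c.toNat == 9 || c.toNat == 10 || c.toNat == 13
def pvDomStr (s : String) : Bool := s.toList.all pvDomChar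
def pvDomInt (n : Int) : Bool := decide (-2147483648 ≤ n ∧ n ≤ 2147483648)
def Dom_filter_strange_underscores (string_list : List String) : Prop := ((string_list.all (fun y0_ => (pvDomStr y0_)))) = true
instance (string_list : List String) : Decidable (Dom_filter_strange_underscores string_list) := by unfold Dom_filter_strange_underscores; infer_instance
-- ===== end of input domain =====

-- B replaces A's split('.')-plus-inner-scan with a direct four-condition boundary test
-- (leading '_', trailing '_', '._' in item, '_.' in item) in a list comprehension (objective: idiomatic).

-- ===== PORT A =====
-- inner 'for split_item in split_items: … break' loop of A
def aInnerLoop : List (List Char) → Bool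
  | [] => false
  | split_item :: rest =>
    if PySem.Chars.endswith split_item ['_'] || PySem.Chars.startswith split_item ['_'] then true
    else aInnerLoop rest

def filter_strange_underscores (string_list : List String) : List String :=
  string_list.foldl (fun output item =>
    let split_items := PySem.Chars.splitOn item.toList ['.']
    let is_bad := aInnerLoop split_items
    if !is_bad then output ++ [item] else output) []

-- ===== PORT B =====
-- helper _bad of Source B
def bIsBad (item : String) : Bool :=
  PySem.Str.startswith item "_" || PySem.Str.endswith item "_" ||
  PySem.Str.isIn "._" item || PySem.Str.isIn "_." item

def filter_strange_underscores_alt (string_list : List String) : List String :=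
  string_list.filter (fun item => !(bIsBad item))

-- ===== PRECONDITION & SPEC =====
def Spec_filter_strange_underscores (string_list : List String) (out : List String) : Prop := out = filter_strange_underscores_alt string_list
instance (string_list : List String) (out : List String) : Decidable (Spec_filter_strange_underscores string_list out) := by unfold Spec_filter_strange_underscores; infer_instance

-- ===== CLAIM (what is proved, stated in full; the proofs are below) =====
def Claim_equal_filter_strange_underscores : Prop := ∀ (string_list : List String), Dom_filter_strange_underscores string_list → Spec_filter_strange_underscores string_list (filter_strange_underscores string_list)

-- ===== LEMMAS AND PROOFS =====

-- the segments of cs split at '.', as a plain structural recursion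
def segs : List Char → List (List Char)
  | [] => [[]]
  | c :: rest =>
    if c = '.' then [] :: segs rest
    else match segs rest with
      | [] => [[c]]
      | s :: ss => (c :: s) :: ss

theorem segs_ne_nil (cs : List Char) : segs cs ≠ [] := by
  induction cs with
  | nil => simp [segs]
  | cons c rest ih =>
    simp only [segs]
    split
    · simp
    · split
      · simp
      · simp

theorem segs_cons_dot (rest : List Char) : segs ('.' :: rest) = [] :: segs rest := by
  simp [segs]

theorem segs_cons_ne (c : Char) (rest : List Char) (hc : c ≠ '.')
    (s0 : List Char) (ss0 : List (List Char)) (hs : segs rest = s0 :: ss0) :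
    segs (c :: rest) = (c :: s0) :: ss0 := by
  simp [segs, hc, hs]

theorem go_eq_segs (l : List Char) : ∀ (fuel : Nat) (cur : List Char) (acc : List (List Char)),
    l.length ≤ fuel →
    PySem.Chars.splitOn.go ['.'] fuel l cur acc =
      acc.reverse ++ (match segs l with
        | [] => []
        | s :: ss => (cur.reverse ++ s) :: ss) := by
  induction l with
  | nil =>
    intro fuel cur acc h
    cases fuel <;> simp [PySem.Chars.splitOn.go, segs]
  | cons c rest ih =>
    intro fuel cur acc h
    cases fuel with
    | zero => simp at h
    | succ f =>
      rw [PySem.Chars.splitOn.go]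
      by_cases hc : c = '.'
      · subst hc
        have hpre : List.isPrefixOf ['.'] ('.' :: rest) = true := by simp [List.isPrefixOf]
        simp only [hpre, if_pos, List.length_cons, List.length_nil, List.drop_succ_cons, List.drop_zero]
        rw [ih f [] (cur.reverse :: acc) (by simpa using Nat.le_of_succ_le_succ h)]
        cases hs : segs rest with
        | nil => exact absurd hs (segs_ne_nil rest)
        | cons s ss => simp [segs, hs]
      · have hpre : List.isPrefixOf ['.'] (c :: rest) = false := by
          simp [List.isPrefixOf]; intro h'; exact hc h'.symm
        simp only [hpre, Bool.false_eq_true, if_false]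
        rw [ih f (c :: cur) acc (by simpa using Nat.le_of_succ_le_succ h)]
        cases hs : segs rest with
        | nil => exact absurd hs (segs_ne_nil rest)
        | cons s ss => simp [segs, hs, hc]

theorem splitOn_eq_segs (cs : List Char) : PySem.Chars.splitOn cs ['.'] = segs cs := by
  rw [PySem.Chars.splitOn, go_eq_segs cs (cs.length + 1) [] [] (by omega)]
  cases hs : segs cs with
  | nil => exact absurd hs (segs_ne_nil cs)
  | cons s ss => simp

-- singleton prefix is a statement about the head
theorem singleton_prefix_iff {a : Char} {l : List Char} : [a] <+: l ↔ l.head? = some a := by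
  cases l with
  | nil => simp
  | cons b t => simp [List.cons_prefix_cons, eq_comm]

-- the first segment starts with '_' iff the whole string does
theorem segs_head_prefix (cs : List Char) (s : List Char) (ss : List (List Char))
    (h : segs cs = s :: ss) : (['_'] <+: s ↔ ['_'] <+: cs) := by
  cases cs with
  | nil => simp [segs] at h; simp [h.1]
  | cons c rest =>
    by_cases hc : c = '.'
    · subst hc
      rw [segs_cons_dot] at h
      simp only [List.cons.injEq] at h
      rw [← h.1]
      simp
    · cases hs : segs rest with
      | nil => exact absurd hs (segs_ne_nil rest)
      | cons s0 ss0 =>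
        rw [segs_cons_ne c rest hc s0 ss0 hs] at h
        simp only [List.cons.injEq] at h
        rw [← h.1]
        simp

-- some later segment starts with '_' iff '._' occurs in the string
theorem segs_tail_prefix (cs : List Char) : ∀ (s : List Char) (ss : List (List Char)),
    segs cs = s :: ss → ((∃ t ∈ ss, ['_'] <+: t) ↔ ['.', '_'] <:+: cs) := by
  induction cs with
  | nil =>
    intro s ss h
    simp [segs] at h
    simp [h.2]
  | cons c rest ih =>
    intro s ss h
    by_cases hc : c = '.'
    · subst hc
      rw [segs_cons_dot] at h
      simp only [List.cons.injEq] at h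
      cases hs : segs rest with
      | nil => exact absurd hs (segs_ne_nil rest)
      | cons s0 ss0 =>
        rw [hs] at h
        rw [← h.2]
        constructor
        · rintro ⟨t, ht, hp⟩
          rw [List.infix_cons_iff]
          rcases List.mem_cons.mp ht with h0 | h0
          · left
            exact List.cons_prefix_cons.mpr ⟨rfl, (segs_head_prefix rest s0 ss0 hs).mp (h0 ▸ hp)⟩
          · right
            exact (ih s0 ss0 hs).mp ⟨t, h0, hp⟩
        · intro hinf
          rcases List.infix_cons_iff.mp hinf with hp | hi
          · rcases List.cons_prefix_cons.mp hp with ⟨_, hp2⟩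
            have : ['_'] <+: s0 := by
              rw [singleton_prefix_iff]
              rw [singleton_prefix_iff] at hp2
              have := segs_head_prefix rest s0 ss0 hs
              rw [singleton_prefix_iff, singleton_prefix_iff] at this
              exact this.mpr hp2
            exact ⟨s0, List.mem_cons_self, this⟩
          · obtain ⟨t, ht, hp⟩ := (ih s0 ss0 hs).mpr hi
            exact ⟨t, List.mem_cons_of_mem _ ht, hp⟩
    · cases hs : segs rest with
      | nil => exact absurd hs (segs_ne_nil rest)
      | cons s0 ss0 =>
        rw [segs_cons_ne c rest hc s0 ss0 hs] at h
        simp only [List.cons.injEq] at h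
        rw [← h.2]
        rw [ih s0 ss0 hs, List.infix_cons_iff]
        constructor
        · exact Or.inr
        · rintro (hp | hi)
          · rcases List.cons_prefix_cons.mp hp with ⟨h1, _⟩
            exact absurd h1.symm hc
          · exact hi

-- the first segment is empty iff the string is empty or starts with '.'
theorem segs_head_nil_iff (cs : List Char) (s : List Char) (ss : List (List Char))
    (h : segs cs = s :: ss) : (s = [] ↔ cs = [] ∨ cs.head? = some '.') := by
  cases cs with
  | nil => simp [segs] at h; simp [h.1]
  | cons c rest =>
    by_cases hc : c = '.'
    · subst hc
      rw [segs_cons_dot] at h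
      simp only [List.cons.injEq] at h
      simp [← h.1]
    · cases hs : segs rest with
      | nil => exact absurd hs (segs_ne_nil rest)
      | cons s0 ss0 =>
        rw [segs_cons_ne c rest hc s0 ss0 hs] at h
        simp only [List.cons.injEq] at h
        rw [← h.1]
        simp [hc]

-- some segment ends with '_' iff the string ends with '_' or contains '_.'
theorem segs_suffix (cs : List Char) :
    (∃ t ∈ segs cs, ['_'] <:+ t) ↔ (['_'] <:+ cs ∨ ['_', '.'] <:+: cs) := by
  induction cs with
  | nil => simp [segs]
  | cons c rest ih =>
    by_cases hc : c = '.'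
    · subst hc
      rw [segs_cons_dot]
      constructor
      · rintro ⟨t, ht, hsuf⟩
        rcases List.mem_cons.mp ht with h0 | h0
        · subst h0; simp at hsuf
        · rcases ih.mp ⟨t, h0, hsuf⟩ with h1 | h1
          · exact Or.inl (List.suffix_cons_iff.mpr (Or.inr h1))
          · exact Or.inr (List.infix_cons_iff.mpr (Or.inr h1))
      · rintro (h1 | h1)
        · rcases List.suffix_cons_iff.mp h1 with h2 | h2
          · simp at h2
          · obtain ⟨t, ht, hp⟩ := ih.mpr (Or.inl h2)
            exact ⟨t, List.mem_cons_of_mem _ ht, hp⟩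
        · rcases List.infix_cons_iff.mp h1 with h2 | h2
          · rcases List.cons_prefix_cons.mp h2 with ⟨h3, _⟩
            simp at h3
          · obtain ⟨t, ht, hp⟩ := ih.mpr (Or.inr h2)
            exact ⟨t, List.mem_cons_of_mem _ ht, hp⟩
    · cases hs : segs rest with
      | nil => exact absurd hs (segs_ne_nil rest)
      | cons s0 ss0 =>
        rw [segs_cons_ne c rest hc s0 ss0 hs]
        have hnil := segs_head_nil_iff rest s0 ss0 hs
        have ihs : (['_'] <:+ s0 ∨ ∃ t ∈ ss0, ['_'] <:+ t) ↔ (['_'] <:+ rest ∨ ['_', '.'] <:+: rest) := by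
          rw [← ih]
          simp [hs]
        constructor
        · rintro ⟨t, ht, hsuf⟩
          rcases List.mem_cons.mp ht with h0 | h0
          · subst h0
            rcases List.suffix_cons_iff.mp hsuf with h2 | h2
            · -- ['_'] = c :: s0 : so c = '_' and s0 = []
              have hcu : c = '_' ∧ s0 = [] := by
                have := h2.symm
                simp only [List.cons.injEq] at this
                exact ⟨this.1, this.2⟩
              rcases (hnil.mp hcu.2) with h3 | h3
              · subst h3
                exact Or.inl (by simp [hcu.1])
              · -- rest starts with '.', so ['_','.'] is a prefix of c :: rest
                cases rest with
                | nil => simp at h3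
                | cons d r2 =>
                  simp at h3
                  subst h3
                  exact Or.inr ⟨[], r2, by simp [hcu.1]⟩
            · rcases ihs.mp (Or.inl h2) with h3 | h3
              · exact Or.inl (List.suffix_cons_iff.mpr (Or.inr h3))
              · exact Or.inr (List.infix_cons_iff.mpr (Or.inr h3))
          · rcases ihs.mp (Or.inr ⟨t, h0, hsuf⟩) with h3 | h3
            · exact Or.inl (List.suffix_cons_iff.mpr (Or.inr h3))
            · exact Or.inr (List.infix_cons_iff.mpr (Or.inr h3))
        · rintro (h1 | h1)
          · rcases List.suffix_cons_iff.mp h1 with h2 | h2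
            · -- ['_'] = c :: rest : c = '_', rest = []
              have hcu : c = '_' ∧ rest = [] := by
                have := h2.symm
                simp only [List.cons.injEq] at this
                exact ⟨this.1, this.2⟩
              have hs0 : s0 = [] := hnil.mpr (Or.inl hcu.2)
              exact ⟨c :: s0, List.mem_cons_self, by simp [hcu.1, hs0]⟩
            · rcases ihs.mpr (Or.inl h2) with h3 | h3
              · exact ⟨c :: s0, List.mem_cons_self,
                  List.suffix_cons_iff.mpr (Or.inr h3)⟩
              · obtain ⟨t, ht, hp⟩ := h3
                exact ⟨t, List.mem_cons_of_mem _ ht, hp⟩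
          · rcases List.infix_cons_iff.mp h1 with h2 | h2
            · -- ['_','.'] <+: c :: rest : c = '_' and rest starts with '.'
              rcases List.cons_prefix_cons.mp h2 with ⟨h3, h4⟩
              have hs0 : s0 = [] := by
                apply hnil.mpr
                right
                rw [← singleton_prefix_iff]
                exact h4
              exact ⟨c :: s0, List.mem_cons_self, by simp [← h3, hs0]⟩
            · rcases ihs.mpr (Or.inr h2) with h3 | h3
              · exact ⟨c :: s0, List.mem_cons_self,
                  List.suffix_cons_iff.mpr (Or.inr h3)⟩
              · obtain ⟨t, ht, hp⟩ := h3
                exact ⟨t, List.mem_cons_of_mem _ ht, hp⟩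

-- A's inner break-loop is an 'any'
theorem aInnerLoop_iff (l : List (List Char)) :
    aInnerLoop l = true ↔ ∃ t ∈ l, (['_'] <:+ t ∨ ['_'] <+: t) := by
  induction l with
  | nil => simp [aInnerLoop]
  | cons t rest ih =>
    simp only [aInnerLoop]
    split
    · rename_i hcond
      simp only [Bool.or_eq_true, PySem.Chars.endswith_iff, PySem.Chars.startswith_iff] at hcond
      simp only [true_iff]
      exact ⟨t, List.mem_cons_self, hcond⟩
    · rename_i hcond
      simp only [Bool.or_eq_true, PySem.Chars.endswith_iff, PySem.Chars.startswith_iff] at hcond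
      rw [not_or] at hcond
      rw [ih]
      constructor
      · rintro ⟨u, hu, hp⟩
        exact ⟨u, List.mem_cons_of_mem _ hu, hp⟩
      · rintro ⟨u, hu, hp⟩
        rcases List.mem_cons.mp hu with h0 | h0
        · subst h0
          rcases hp with h1 | h1
          · exact absurd h1 hcond.1
          · exact absurd h1 hcond.2
        · exact ⟨u, h0, hp⟩

-- pointwise: A's per-item badness test equals B's
theorem point (item : String) :
    aInnerLoop (PySem.Chars.splitOn item.toList ['.']) = bIsBad item := by
  rw [Bool.eq_iff_iff, aInnerLoop_iff, splitOn_eq_segs]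
  have hb : bIsBad item = true ↔
      (['_'] <+: item.toList ∨ ['_'] <:+ item.toList ∨
       ['.', '_'] <:+: item.toList ∨ ['_', '.'] <:+: item.toList) := by
    simp only [bIsBad, Bool.or_eq_true, PySem.Str.startswith_eq, PySem.Str.endswith_eq,
      PySem.Str.isIn_eq, PySem.Chars.startswith_iff, PySem.Chars.endswith_iff,
      PySem.Chars.isIn_iff_infix]
    have h1 : ("_" : String).toList = ['_'] := rfl
    have h2 : ("._" : String).toList = ['.', '_'] := rfl
    have h3 : ("_." : String).toList = ['_', '.'] := rfl
    rw [h1, h2, h3]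
    tauto
  rw [hb]
  cases hs : segs item.toList with
  | nil => exact absurd hs (segs_ne_nil _)
  | cons s ss =>
    have hhead := segs_head_prefix item.toList s ss hs
    have htail := segs_tail_prefix item.toList s ss hs
    have hsuf := segs_suffix item.toList
    rw [hs] at hsuf
    constructor
    · rintro ⟨t, ht, hp | hp⟩
      · rcases hsuf.mp ⟨t, ht, hp⟩ with h1 | h1
        · exact Or.inr (Or.inl h1)
        · exact Or.inr (Or.inr (Or.inr h1))
      · rcases List.mem_cons.mp ht with h0 | h0
        · exact Or.inl (hhead.mp (h0 ▸ hp))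
        · exact Or.inr (Or.inr (Or.inl (htail.mp ⟨t, h0, hp⟩)))
    · rintro (h1 | h1 | h1 | h1)
      · exact ⟨s, List.mem_cons_self, Or.inr (hhead.mpr h1)⟩
      · obtain ⟨t, ht, hp⟩ := hsuf.mpr (Or.inl h1)
        exact ⟨t, ht, Or.inl hp⟩
      · obtain ⟨t, ht, hp⟩ := htail.mpr h1
        exact ⟨t, List.mem_cons_of_mem _ ht, Or.inr hp⟩
      · obtain ⟨t, ht, hp⟩ := hsuf.mpr (Or.inr h1)
        exact ⟨t, ht, Or.inl hp⟩

-- ===== VERDICT (by name: the statement is the Claim_ definition above) =====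
theorem filter_strange_underscores_spec : Claim_equal_filter_strange_underscores := by
  intro string_list _
  unfold Spec_filter_strange_underscores filter_strange_underscores filter_strange_underscores_alt
  rw [show (fun (output : List String) (item : String) =>
      let split_items := PySem.Chars.splitOn item.toList ['.']
      let is_bad := aInnerLoop split_items
      if !is_bad then output ++ [item] else output)
    = (fun acc x => if !(bIsBad x) then acc ++ [id x] else acc) from by
      funext output item
      simp only [point, id]]
  rw [PySem.List.foldl_append_if (fun x => !(bIsBad x)) id string_list []]
  simp [List.map_id]
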